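-- pv_equiv track=rewrite | github.com/avalouev/basic_algorithms | radix_sort/radix_sort.py | digits_to_numbers
-- ===== SOURCE A (Python) =====
-- def digits_to_numbers(A, mod):
-- 	# converts digits to numbers
-- 	res = []
-- 	for i in range(len(A)):
-- 		digits = A[i]
-- 		cur_num = 0
-- 		for j in range(len(digits)):
-- 			cur_num += digits[len(digits)-j-1] * pow(mod, j) #mod^j
-- 		res.append(cur_num)
--
-- 	return res
-- ===== SOURCE B (Python) =====
-- def digits_to_numbers(A, mod):
--     # Horner's method: one multiply-add per digit, no pow() calls
--     res = []
--     for digits in A: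
--         cur = 0
--         for d in digits:
--             cur = cur * mod + d
--         res.append(cur)
--     return res
-- ===== Notes on version B (the rewrite author's own statement) =====
-- stated objective: faster
-- what changed: Replaces the index-based positional sum digits[len-j-1]*pow(mod,j) with Horner's method (cur = cur*mod + digit) iterating directly over each digit list, eliminating all pow() calls and index arithmetic.
import Mathlib
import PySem

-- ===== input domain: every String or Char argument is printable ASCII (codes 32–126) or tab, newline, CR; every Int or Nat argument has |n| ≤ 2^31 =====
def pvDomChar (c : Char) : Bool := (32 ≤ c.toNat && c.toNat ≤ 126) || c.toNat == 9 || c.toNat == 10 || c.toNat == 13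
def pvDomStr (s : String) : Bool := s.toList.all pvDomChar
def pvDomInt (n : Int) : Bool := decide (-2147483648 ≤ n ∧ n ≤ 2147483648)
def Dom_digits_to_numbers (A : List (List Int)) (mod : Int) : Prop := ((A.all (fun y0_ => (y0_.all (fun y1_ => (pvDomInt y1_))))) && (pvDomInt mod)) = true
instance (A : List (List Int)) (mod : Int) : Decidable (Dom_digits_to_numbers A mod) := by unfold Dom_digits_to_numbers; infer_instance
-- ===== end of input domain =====

-- B replaces the per-digit pow(mod, j) positional sum with Horner's method (one multiply-add per digit).

-- ===== PORT A =====
def digits_to_numbers (A : List (List Int)) (mod : Int) : List Int :=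
  (PySem.List.pyRange 0 (PySem.List.len A) 1).foldl (fun res i =>
    let digits := PySem.List.pyGetD A i []
    let cur_num := (PySem.List.pyRange 0 (PySem.List.len digits) 1).foldl
      (fun cur j =>
        cur + PySem.List.pyGetD digits (PySem.List.len digits - j - 1) 0 * mod ^ j.toNat) 0
    res ++ [cur_num]) []

-- ===== PORT B =====
def digits_to_numbers_alt (A : List (List Int)) (mod : Int) : List Int :=
  A.map (fun digits => digits.foldl (fun cur d => cur * mod + d) 0)

-- ===== PRECONDITION & SPEC =====
def Spec_digits_to_numbers (A : List (List Int)) (mod : Int) (out : List Int) : Prop := out = digits_to_numbers_alt A mod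
instance (A : List (List Int)) (mod : Int) (out : List Int) : Decidable (Spec_digits_to_numbers A mod out) := by unfold Spec_digits_to_numbers; infer_instance

-- ===== CLAIM (what is proved, stated in full; the proofs are below) =====
def Claim_equal_digits_to_numbers : Prop := ∀ (A : List (List Int)) (mod : Int), Dom_digits_to_numbers A mod → Spec_digits_to_numbers A mod (digits_to_numbers A mod)

-- ===== LEMMAS AND PROOFS =====

-- the common positional value: Σ_j reverse(digits)[j] * mod^j
def posSum (digits : List Int) (mod : Int) : Int :=
  ((List.range digits.length).map (fun j => digits.reverse.getD j 0 * mod ^ j)).sum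

lemma horner_gen (mod : Int) : ∀ (digits : List Int) (c : Int),
    digits.foldl (fun cur d => cur * mod + d) c
      = c * mod ^ digits.length + posSum digits mod := by
  intro digits
  induction digits with
  | nil => intro c; simp [posSum]
  | cons d rest ih =>
    intro c
    have hS : posSum (d :: rest) mod = posSum rest mod + d * mod ^ rest.length := by
      simp only [posSum, List.length_cons, List.reverse_cons, List.range_succ,
        List.map_append, List.sum_append, List.map_cons, List.map_nil, List.sum_cons,
        List.sum_nil]
      have hlast : (rest.reverse ++ [d]).getD rest.length 0 = d := by
        rw [List.getD_eq_getElem?_getD]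
        simp
      have hrest : ∀ j ∈ List.range rest.length,
          (rest.reverse ++ [d]).getD j 0 * mod ^ j = rest.reverse.getD j 0 * mod ^ j := by
        intro j hj
        rw [List.mem_range] at hj
        rw [List.getD_append _ _ _ _ (by simpa using hj)]
      rw [List.map_congr_left hrest, hlast]
      ring
    calc (d :: rest).foldl (fun cur d => cur * mod + d) c
        = rest.foldl (fun cur d => cur * mod + d) (c * mod + d) := rfl
      _ = (c * mod + d) * mod ^ rest.length + posSum rest mod := ih _
      _ = c * mod ^ (d :: rest).length + posSum (d :: rest) mod := by
          rw [hS]; simp [List.length_cons, pow_succ]; ring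

lemma innerA (digits : List Int) (mod : Int) :
    (PySem.List.pyRange 0 (PySem.List.len digits) 1).foldl
      (fun cur j =>
        cur + PySem.List.pyGetD digits (PySem.List.len digits - j - 1) 0 * mod ^ j.toNat) 0
      = posSum digits mod := by
  have hrange : PySem.List.pyRange 0 (PySem.List.len digits) 1
      = (List.range digits.length).map (fun (k : Nat) => (k : Int)) := by
    have hn : ((PySem.List.len digits) - 0).toNat = digits.length := by
      simp [PySem.List.len]
    rw [PySem.List.pyRange_one, hn]
    apply List.map_congr_left
    intro k _
    simp
  rw [hrange, List.foldl_map, PySem.List.foldl_add]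
  simp only [zero_add, posSum]
  congr 1
  apply List.map_congr_left
  intro j hj
  rw [List.mem_range] at hj
  have hidx : PySem.List.pyGetD digits ((PySem.List.len digits) - (j : Int) - 1) 0
      = digits.reverse.getD j 0 := by
    have hlen : PySem.List.len digits = (digits.length : Int) := by
      simp [PySem.List.len]
    have hcast : (digits.length : Int) - (j : Int) - 1
        = ((digits.length - 1 - j : Nat) : Int) := by omega
    rw [hlen, hcast, PySem.List.pyGetD_natCast]
    rw [List.getD_eq_getElem?_getD, List.getD_eq_getElem?_getD,
      List.getElem?_reverse (by omega)]
  rw [hidx]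
  norm_num

theorem digits_to_numbers_eq (A : List (List Int)) (mod : Int) :
    digits_to_numbers A mod = digits_to_numbers_alt A mod := by
  unfold digits_to_numbers digits_to_numbers_alt
  rw [PySem.List.foldl_pyRange_zero_pyGetD A ([] : List Int)
    (fun res digits =>
      res ++ [(PySem.List.pyRange 0 (PySem.List.len digits) 1).foldl
        (fun cur j =>
          cur + PySem.List.pyGetD digits (PySem.List.len digits - j - 1) 0 * mod ^ j.toNat) 0])
    ([] : List Int)]
  rw [PySem.List.foldl_append_singleton_eq_map]
  simp only [List.nil_append]
  apply List.map_congr_left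
  intro digits _
  rw [innerA, horner_gen]
  simp

-- ===== VERDICT (by name: the statement is the Claim_ definition above) =====
theorem digits_to_numbers_spec : Claim_equal_digits_to_numbers := by
  intro A mod _
  unfold Spec_digits_to_numbers
  exact digits_to_numbers_eq A mod
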